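-- pv_equiv track=rewrite | github.com/colinarticulate/pronounce-experimental | Transcriptions/workshop/expression_parser.py | generate_expectation
-- ===== SOURCE A (Python) =====
-- def generate_expectation(multi_transcript):
--     sep=","
--     verdicts=["good","possible"]
--     expectation=[]
--     for item in multi_transcript:
--         if len(item)==1:
--             for phone in item[0].split(" "):
--                 expectation.append(phone)
--                 for v in verdicts:
--                     expectation.append(v)
--         else:
--             expectation.append("(")
--             for subitem in item[:-1]:
--                 for phone in subitem.split(" "):
--                     expectation.append(phone)
--                     for v in verdicts:
--                         expectation.append(v)
--                 expectation.append("||")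
--             for phone in item[-1].split(" "):
--                 expectation.append(phone)
--                 for v in verdicts:
--                     expectation.append(v)
--             expectation.append(")")
--
--     merge1=" ".join(expectation)
--     merge2=merge1.split(" ")
--     merge3=sep.join(merge2)+sep
--
--     return merge3
-- ===== SOURCE B (Python) =====
-- def generate_expectation(multi_transcript):
--     VER = ",good,possible,"
--
--     def expand(s):
--         return s.replace(" ", VER) + VER
--
--     parts = []
--     for item in multi_transcript:
--         if len(item) == 1:
--             parts.append(expand(item[0]))
--         else:
--             mids = "".join(expand(sub) + "||," for sub in item[:-1])
--             parts.append("(," + mids + expand(item[-1]) + "),")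
--     return "".join(parts)
-- ===== Notes on version B (the rewrite author's own statement) =====
-- stated objective: idiomatic
-- what changed: Replaces the token-list building (nested loops appending phones and constant verdict tokens, then a no-op join/split/join merge) with direct string rewriting: each transcript expands via s.replace(' ', ',good,possible,') + ',good,possible,' and the pieces are concatenated once; Pre_ excludes inputs containing an empty item, on which A raises IndexError at item[-1].
-- intended difference: On the empty transcript list A returns a lone ',' (an artefact of its join/split/join round-trip turning the empty token list into one empty token plus the appended separator), while B returns the empty string, the intended 'no expectation tokens' value. — e.g. on generate_expectation([]): A returns ",", B returns ""
import Mathlib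
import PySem

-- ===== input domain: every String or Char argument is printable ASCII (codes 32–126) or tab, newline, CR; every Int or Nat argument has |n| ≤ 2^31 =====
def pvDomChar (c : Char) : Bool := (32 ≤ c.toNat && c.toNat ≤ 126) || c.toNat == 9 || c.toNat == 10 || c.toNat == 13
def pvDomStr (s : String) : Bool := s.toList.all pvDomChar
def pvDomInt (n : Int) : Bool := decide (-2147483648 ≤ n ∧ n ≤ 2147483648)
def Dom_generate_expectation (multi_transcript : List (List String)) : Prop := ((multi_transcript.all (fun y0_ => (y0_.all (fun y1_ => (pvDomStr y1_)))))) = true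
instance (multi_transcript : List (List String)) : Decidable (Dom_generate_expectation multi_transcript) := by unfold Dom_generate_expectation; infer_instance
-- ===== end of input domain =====

-- B replaces A's token-list building and no-op join/split/join merge by direct string
-- rewriting with replace/concatenation (idiomatic); A is matched on all inputs with
-- nonempty items except the empty transcript list, where B returns "" instead of A's ",".


-- ===== PORT A =====
-- s.split(" "): sep is nonempty, so PySem.Str.split? always returns some
def pySplitSpace (s : String) : List String := (PySem.Str.split? s " ").getD []

def generate_expectation (multi_transcript : List (List String)) : String :=
  let sep := ","
  let verdicts := ["good", "possible"]
  let expectation : List String :=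
    multi_transcript.foldl (fun expectation item =>
      if item.length == 1 then
        (pySplitSpace (PySem.List.pyGetD item 0 "")).foldl
          (fun expectation phone =>
            verdicts.foldl (fun expectation v => expectation ++ [v]) (expectation ++ [phone]))
          expectation
      else
        let expectation := expectation ++ ["("]
        let expectation := (PySem.List.slice item none (some (-1))).foldl
          (fun expectation subitem =>
            ((pySplitSpace subitem).foldl
              (fun expectation phone =>
                verdicts.foldl (fun expectation v => expectation ++ [v]) (expectation ++ [phone]))
              expectation) ++ ["||"])
          expectation
        let expectation := (pySplitSpace (PySem.List.pyGetD item (-1) "")).foldl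
          (fun expectation phone =>
            verdicts.foldl (fun expectation v => expectation ++ [v]) (expectation ++ [phone]))
          expectation
        expectation ++ [")"]) []
  let merge1 := PySem.Str.join " " expectation
  let merge2 := pySplitSpace merge1
  let merge3 := PySem.Str.join sep merge2 ++ sep
  merge3

-- ===== PORT B =====
def pvExpand (s : String) : String :=
  PySem.Str.replace s " " ",good,possible," ++ ",good,possible,"

def generate_expectation_alt (multi_transcript : List (List String)) : String :=
  let parts : List String :=
    multi_transcript.foldl (fun parts item =>
      if item.length == 1 then
        parts ++ [pvExpand (PySem.List.pyGetD item 0 "")]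
      else
        let mids := PySem.Str.join ""
          ((PySem.List.slice item none (some (-1))).map (fun sub => pvExpand sub ++ "||,"))
        parts ++ ["(," ++ mids ++ pvExpand (PySem.List.pyGetD item (-1) "") ++ "),"]) []
  PySem.Str.join "" parts

-- ===== PRECONDITION & SPEC =====
-- A (and B) raise IndexError on item[-1] for an empty item; Pre_ excludes exactly those inputs.
def Pre_generate_expectation (multi_transcript : List (List String)) : Prop :=
  ∀ item ∈ multi_transcript, item ≠ []
instance (multi_transcript : List (List String)) : Decidable (Pre_generate_expectation multi_transcript) := by unfold Pre_generate_expectation; infer_instance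
def pvWitness_generate_expectation : List (List String) := [["a b"], ["x", "y z"]]

-- On the empty transcript list A returns a lone "," (an artefact of its join/split/join
-- round-trip turning the empty token list into one empty token plus the appended
-- separator), while B returns the empty string, the intended 'no tokens' value.
def D_generate_expectation (multi_transcript : List (List String)) : Prop :=
  multi_transcript = []
instance (multi_transcript : List (List String)) : Decidable (D_generate_expectation multi_transcript) := by unfold D_generate_expectation; infer_instance

def Spec_generate_expectation (multi_transcript : List (List String)) (out : String) : Prop := ¬ D_generate_expectation multi_transcript → out = generate_expectation_alt multi_transcript
instance (multi_transcript : List (List String)) (out : String) : Decidable (Spec_generate_expectation multi_transcript out) := by unfold Spec_generate_expectation; infer_instance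

def pvDiffWitness_generate_expectation : List (List String) := []
def pvDiffWitnessOut_generate_expectation : String × String := (",", "")

-- ===== CLAIM (what is proved, stated in full; the proofs are below) =====
def Claim_unchanged_generate_expectation : Prop := ∀ (multi_transcript : List (List String)), Dom_generate_expectation multi_transcript → Pre_generate_expectation multi_transcript → Spec_generate_expectation multi_transcript (generate_expectation multi_transcript)
def Claim_changed_generate_expectation : Prop := Dom_generate_expectation (pvDiffWitness_generate_expectation) ∧ Pre_generate_expectation (pvDiffWitness_generate_expectation) ∧ D_generate_expectation (pvDiffWitness_generate_expectation) ∧ generate_expectation (pvDiffWitness_generate_expectation) = pvDiffWitnessOut_generate_expectation.1 ∧ generate_expectation_alt (pvDiffWitness_generate_expectation) = pvDiffWitnessOut_generate_expectation.2 ∧ pvDiffWitnessOut_generate_expectation.1 ≠ pvDiffWitnessOut_generate_expectation.2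
def Claim_exact_generate_expectation : Prop := ∀ (multi_transcript : List (List String)), Dom_generate_expectation multi_transcript → Pre_generate_expectation multi_transcript → D_generate_expectation multi_transcript → generate_expectation multi_transcript ≠ generate_expectation_alt multi_transcript

-- ===== LEMMAS AND PROOFS =====

-- pure recursive form of splitOn.go for the single-char separator ' '
def pvSplitF : List Char → List Char → List (List Char)
  | [], cur => [cur.reverse]
  | c :: t, cur => if c = ' ' then cur.reverse :: pvSplitF t [] else pvSplitF t (c :: cur)

-- pure recursive form of replace.go for the single-char pattern ' '
def pvRepF (V : List Char) : List Char → List Char → List Char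
  | [], acc => acc.reverse
  | c :: t, acc => if c = ' ' then pvRepF V t (V.reverse ++ acc) else pvRepF V t (c :: acc)

theorem pvSplit_go_eq (fuel : Nat) (l cur : List Char) (acc : List (List Char))
    (h : l.length ≤ fuel) :
    PySem.Chars.splitOn.go [' '] fuel l cur acc = acc.reverse ++ pvSplitF l cur := by
  induction fuel generalizing l cur acc with
  | zero =>
      have : l = [] := by cases l <;> simp_all
      subst this; simp [PySem.Chars.splitOn.go, pvSplitF]
  | succ n ih =>
      cases l with
      | nil => simp [PySem.Chars.splitOn.go, pvSplitF]
      | cons c t =>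
          have hlen : t.length ≤ n := by simpa using Nat.le_of_succ_le_succ h
          by_cases hc : c = ' '
          · subst hc
            rw [show PySem.Chars.splitOn.go [' '] (n + 1) (' ' :: t) cur acc
                  = PySem.Chars.splitOn.go [' '] n t [] (cur.reverse :: acc) from by
              simp [PySem.Chars.splitOn.go, List.isPrefixOf]]
            rw [ih t [] _ hlen]
            simp [pvSplitF]
          · have hc' : ¬ (' ' = c) := fun h' => hc h'.symm
            rw [show PySem.Chars.splitOn.go [' '] (n + 1) (c :: t) cur acc
                  = PySem.Chars.splitOn.go [' '] n t (c :: cur) acc from by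
              simp [PySem.Chars.splitOn.go, List.isPrefixOf, hc']]
            rw [ih t _ _ hlen]
            simp [pvSplitF, hc]

theorem pvSplitOn_eq (l : List Char) :
    PySem.Chars.splitOn l [' '] = pvSplitF l [] := by
  simpa using pvSplit_go_eq (l.length + 1) l [] [] (by omega)

theorem pvRep_go_eq (V : List Char) (fuel : Nat) (l : List Char) (acc : List Char)
    (h : l.length ≤ fuel) :
    PySem.Chars.replace.go [' '] V fuel l acc = pvRepF V l acc := by
  induction fuel generalizing l acc with
  | zero =>
      have : l = [] := by cases l <;> simp_all
      subst this; simp [PySem.Chars.replace.go, pvRepF]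
  | succ n ih =>
      cases l with
      | nil => simp [PySem.Chars.replace.go, pvRepF]
      | cons c t =>
          have hlen : t.length ≤ n := by simpa using Nat.le_of_succ_le_succ h
          by_cases hc : c = ' '
          · subst hc
            rw [show PySem.Chars.replace.go [' '] V (n + 1) (' ' :: t) acc
                  = PySem.Chars.replace.go [' '] V n t (V.reverse ++ acc) from by
              simp [PySem.Chars.replace.go, List.isPrefixOf]]
            rw [ih t _ hlen]
            simp [pvRepF]
          · have hc' : ¬ (' ' = c) := fun h' => hc h'.symm
            rw [show PySem.Chars.replace.go [' '] V (n + 1) (c :: t) acc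
                  = PySem.Chars.replace.go [' '] V n t (c :: acc) from by
              simp [PySem.Chars.replace.go, List.isPrefixOf, hc']]
            rw [ih t _ hlen]
            simp [pvRepF, hc]

theorem pvReplace_eq (l V : List Char) :
    PySem.Chars.replace l [' '] V = pvRepF V l [] := by
  rw [PySem.Chars.replace]
  simp [pvRep_go_eq V l.length l [] le_rfl]

-- replace-then-append equals the comma-normal form of the split pieces
theorem pvRep_split (V : List Char) (l c a : List Char) :
    pvRepF V l (c ++ a) ++ V = a.reverse ++ ((pvSplitF l c).map (· ++ V)).flatten := by
  induction l generalizing c a with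
  | nil => simp [pvRepF, pvSplitF]
  | cons c0 t ih =>
      by_cases hc : c0 = ' '
      · subst hc
        have h2 := ih [] (V.reverse ++ c ++ a)
        simp only [List.nil_append] at h2
        simp only [pvRepF, pvSplitF, List.append_assoc] at h2 ⊢
        simp [h2]
      · have h2 := ih (c0 :: c) a
        simp_all [pvRepF, pvSplitF]

theorem pvExpand_spec (l V : List Char) :
    ((pvSplitF l []).map (· ++ V)).flatten = pvRepF V l [] ++ V := by
  simpa using (pvRep_split V l [] []).symm

-- pieces produced by split contain no space
theorem pvSplitF_nospace (l cur : List Char) (hc : ' ' ∉ cur) :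
    ∀ p ∈ pvSplitF l cur, ' ' ∉ p := by
  induction l generalizing cur with
  | nil => simpa [pvSplitF] using hc
  | cons c t ih =>
      by_cases h : c = ' '
      · subst h
        simp only [pvSplitF, if_true]
        intro p hp
        rcases List.mem_cons.mp hp with h1 | h1
        · subst h1; simpa using hc
        · exact ih [] (by simp) p h1
      · simp only [pvSplitF, if_neg h]
        refine ih (c :: cur) ?_
        simp only [List.mem_cons, not_or]
        exact ⟨fun h' => h h'.symm, hc⟩

theorem pvSplitF_ne_nil (l cur : List Char) : pvSplitF l cur ≠ [] := by
  induction l generalizing cur with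
  | nil => simp [pvSplitF]
  | cons c t ih => by_cases h : c = ' ' <;> simp [pvSplitF, h, ih]

theorem pvSplitF_append_nospace (p : List Char) (hp : ' ' ∉ p) (rest cur : List Char) :
    pvSplitF (p ++ rest) cur = pvSplitF rest (p.reverse ++ cur) := by
  induction p generalizing cur with
  | nil => simp
  | cons c t ih =>
      have hc : ¬ c = ' ' := by simp at hp; tauto
      have ht : ' ' ∉ t := by simp at hp; tauto
      simp [pvSplitF, hc, ih ht, List.append_assoc]

theorem pvIntercalate_cons (x : List Char) (xs : List (List Char)) (h : xs ≠ []) :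
    List.intercalate [' '] (x :: xs) = x ++ ' ' :: List.intercalate [' '] xs := by
  cases xs with
  | nil => exact absurd rfl h
  | cons y ys => simp [List.intercalate, List.intersperse]

-- split is a left inverse of join-by-space on nonempty lists of space-free pieces
theorem pvSplit_join (parts : List (List Char)) (hne : parts ≠ [])
    (hsp : ∀ p ∈ parts, ' ' ∉ p) :
    pvSplitF (List.intercalate [' '] parts) [] = parts := by
  induction parts with
  | nil => exact absurd rfl hne
  | cons p ps ih =>
      cases ps with
      | nil =>
          have hp : ' ' ∉ p := hsp p (by simp)
          have := pvSplitF_append_nospace p hp [] []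
          simpa [pvSplitF, List.intercalate] using this
      | cons q qs =>
          have hp : ' ' ∉ p := hsp p (by simp)
          rw [pvIntercalate_cons p (q :: qs) (by simp)]
          rw [show p ++ ' ' :: List.intercalate [' '] (q :: qs)
                = p ++ (' ' :: List.intercalate [' '] (q :: qs)) by simp]
          rw [pvSplitF_append_nospace p hp _ []]
          simp only [pvSplitF, if_true]
          rw [ih (by simp) (fun r hr => hsp r (by simp [hr]))]
          simp

-- ",".join(toks) + "," in comma-normal form
theorem pvCommaJoin (toks : List (List Char)) (h : toks ≠ []) :
    List.intercalate [','] toks ++ [','] = (toks.map (· ++ [','])).flatten := by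
  induction toks with
  | nil => exact absurd rfl h
  | cons t ts ih =>
      cases ts with
      | nil => simp [List.intercalate]
      | cons u us =>
          have : List.intercalate [','] (t :: u :: us) = t ++ ',' :: List.intercalate [','] (u :: us) := by
            simp [List.intercalate, List.intersperse]
          rw [this]
          have h2 := ih (by simp)
          rw [List.map_cons, List.flatten_cons, ← h2]
          simp


-- ---- proof-only descriptions of the two programs ----

def pvV : List Char := ",good,possible,".toList

def pvPh (s : String) : List String :=
  (pySplitSpace s).flatMap (fun p => [p, "good", "possible"])

def pvTokA (item : List String) : List String :=
  if item.length == 1 then pvPh (PySem.List.pyGetD item 0 "")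
  else ["("] ++ (PySem.List.slice item none (some (-1))).flatMap (fun sub => pvPh sub ++ ["||"])
       ++ pvPh (PySem.List.pyGetD item (-1) "") ++ [")"]

def pvNorm (toks : List (List Char)) : List Char := (toks.map (· ++ [','])).flatten

def pvPartB (item : List String) : String :=
  if item.length == 1 then pvExpand (PySem.List.pyGetD item 0 "")
  else "(," ++ PySem.Str.join ""
        ((PySem.List.slice item none (some (-1))).map (fun sub => pvExpand sub ++ "||,"))
      ++ pvExpand (PySem.List.pyGetD item (-1) "") ++ "),"

theorem pySplitSpace_toList (s : String) :
    (pySplitSpace s).map String.toList = pvSplitF s.toList [] := by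
  have h := PySem.Str.split?_map s " "
  rw [show (" ").toList = [' '] from rfl, PySem.Chars.split?] at h
  simp only [List.isEmpty_cons, Bool.false_eq_true, if_false] at h
  cases hs : PySem.Str.split? s " " with
  | none => rw [hs] at h; simp at h
  | some xs =>
      rw [hs] at h
      simp only [Option.map_some, Option.some.injEq] at h
      simp [pySplitSpace, hs, h, pvSplitOn_eq]

theorem pvPhFold (ps : List String) (e : List String) :
    ps.foldl (fun e phone => ["good", "possible"].foldl (fun e v => e ++ [v]) (e ++ [phone])) e
      = e ++ ps.flatMap (fun p => [p, "good", "possible"]) := by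
  have hf : (fun (e : List String) phone =>
        ["good", "possible"].foldl (fun e v => e ++ [v]) (e ++ [phone]))
      = fun e phone => e ++ [phone, "good", "possible"] := by
    funext e p; simp [List.foldl]
  rw [hf, PySem.List.foldl_append_eq_flatMap]

theorem pvExpA (mt : List (List String)) :
    (mt.foldl (fun expectation item =>
      if item.length == 1 then
        (pySplitSpace (PySem.List.pyGetD item 0 "")).foldl
          (fun expectation phone =>
            ["good", "possible"].foldl (fun expectation v => expectation ++ [v]) (expectation ++ [phone]))
          expectation
      else
        ((pySplitSpace (PySem.List.pyGetD item (-1) "")).foldl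
          (fun expectation phone =>
            ["good", "possible"].foldl (fun expectation v => expectation ++ [v]) (expectation ++ [phone]))
          ((PySem.List.slice item none (some (-1))).foldl
            (fun expectation subitem =>
              ((pySplitSpace subitem).foldl
                (fun expectation phone =>
                  ["good", "possible"].foldl (fun expectation v => expectation ++ [v]) (expectation ++ [phone]))
                expectation) ++ ["||"])
            (expectation ++ ["("]))) ++ [")"]) [])
      = mt.flatMap pvTokA := by
  suffices hgen : ∀ e, (mt.foldl (fun expectation item =>
      if item.length == 1 then
        (pySplitSpace (PySem.List.pyGetD item 0 "")).foldl
          (fun expectation phone =>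
            ["good", "possible"].foldl (fun expectation v => expectation ++ [v]) (expectation ++ [phone]))
          expectation
      else
        ((pySplitSpace (PySem.List.pyGetD item (-1) "")).foldl
          (fun expectation phone =>
            ["good", "possible"].foldl (fun expectation v => expectation ++ [v]) (expectation ++ [phone]))
          ((PySem.List.slice item none (some (-1))).foldl
            (fun expectation subitem =>
              ((pySplitSpace subitem).foldl
                (fun expectation phone =>
                  ["good", "possible"].foldl (fun expectation v => expectation ++ [v]) (expectation ++ [phone]))
                expectation) ++ ["||"])
            (expectation ++ ["("]))) ++ [")"]) e) = e ++ mt.flatMap pvTokA by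
    simpa using hgen []
  induction mt with
  | nil => intro e; simp
  | cons item rest ih =>
      intro e
      rw [List.foldl_cons, List.flatMap_cons]
      by_cases h : (item.length == 1) = true
      · rw [if_pos h, pvPhFold, ih, pvTokA, if_pos h, pvPh]
        simp
      · rw [if_neg h]
        have hmid : ∀ (e' : List String),
            (PySem.List.slice item none (some (-1))).foldl
              (fun expectation subitem =>
                ((pySplitSpace subitem).foldl
                  (fun expectation phone =>
                    ["good", "possible"].foldl (fun expectation v => expectation ++ [v]) (expectation ++ [phone]))
                  expectation) ++ ["||"]) e'
            = e' ++ (PySem.List.slice item none (some (-1))).flatMap (fun sub => pvPh sub ++ ["||"]) := by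
          intro e'
          have hf : (fun (expectation : List String) subitem =>
              ((pySplitSpace subitem).foldl
                (fun expectation phone =>
                  ["good", "possible"].foldl (fun expectation v => expectation ++ [v]) (expectation ++ [phone]))
                expectation) ++ ["||"])
              = fun expectation sub => expectation ++ (pvPh sub ++ ["||"]) := by
            funext e'' sub
            rw [pvPhFold, pvPh]
            simp
          rw [hf, PySem.List.foldl_append_eq_flatMap]
        rw [hmid, pvPhFold, ih, pvTokA, if_neg h, pvPh]
        simp

theorem pySplitSpace_ne_nil (s : String) : pySplitSpace s ≠ [] := by
  intro h
  have := pySplitSpace_toList s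
  rw [h] at this
  exact pvSplitF_ne_nil s.toList [] this.symm

theorem pySplitSpace_nospace (s : String) : ∀ p ∈ pySplitSpace s, ' ' ∉ p.toList := by
  intro p hp
  have hmem : p.toList ∈ (pySplitSpace s).map String.toList := List.mem_map_of_mem hp
  rw [pySplitSpace_toList] at hmem
  exact pvSplitF_nospace s.toList [] (by simp) p.toList hmem

theorem pvPh_ne_nil (s : String) : pvPh s ≠ [] := by
  rw [pvPh]
  cases hs : pySplitSpace s with
  | nil => exact absurd hs (pySplitSpace_ne_nil s)
  | cons a t => simp

theorem pvPh_nospace (s : String) : ∀ tok ∈ pvPh s, ' ' ∉ tok.toList := by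
  intro tok htok
  rw [pvPh] at htok
  rcases List.mem_flatMap.mp htok with ⟨p, hp, hmem⟩
  simp only [List.mem_cons, List.not_mem_nil, or_false] at hmem
  rcases hmem with h1 | h1 | h1
  · exact h1 ▸ pySplitSpace_nospace s p hp
  · subst h1; decide
  · subst h1; decide

theorem pvTokA_nospace (item : List String) : ∀ tok ∈ pvTokA item, ' ' ∉ tok.toList := by
  intro tok htok
  rw [pvTokA] at htok
  by_cases h : (item.length == 1) = true
  · rw [if_pos h] at htok
    exact pvPh_nospace _ tok htok
  · rw [if_neg h] at htok
    rcases List.mem_append.mp htok with h1 | h1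
    · rcases List.mem_append.mp h1 with h2 | h2
      · rcases List.mem_append.mp h2 with h3 | h3
        · have := List.mem_singleton.mp h3; subst this; decide
        · rcases List.mem_flatMap.mp h3 with ⟨sub, _, hm⟩
          rcases List.mem_append.mp hm with h4 | h4
          · exact pvPh_nospace _ tok h4
          · have := List.mem_singleton.mp h4; subst this; decide
      · exact pvPh_nospace _ tok h2
    · have := List.mem_singleton.mp h1; subst this; decide

theorem pvTokA_ne_nil (item : List String) : pvTokA item ≠ [] := by
  rw [pvTokA]
  by_cases h : (item.length == 1) = true
  · rw [if_pos h]; exact pvPh_ne_nil _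
  · rw [if_neg h]; simp

theorem pvNorm_append (a b : List (List Char)) : pvNorm (a ++ b) = pvNorm a ++ pvNorm b := by
  simp [pvNorm]

theorem pvNorm_flatMap {α : Type} (l : List α) (f : α → List (List Char)) :
    pvNorm (l.flatMap f) = (l.map (fun x => pvNorm (f x))).flatten := by
  induction l with
  | nil => simp [pvNorm]
  | cons x t ih => rw [List.flatMap_cons, pvNorm_append, ih]; simp

-- comma-normal form of one transcript's tokens = the expand() string of B
theorem pvNorm_ph (s : String) : pvNorm ((pvPh s).map String.toList) = (pvExpand s).toList := by
  rw [pvPh, List.map_flatMap, pvNorm_flatMap]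
  have hone : ∀ p : String,
      pvNorm (List.map String.toList [p, "good", "possible"]) = p.toList ++ pvV := by
    intro p; simp [pvNorm, pvV]
  rw [List.map_congr_left (fun p _ => hone p)]
  have : (pySplitSpace s).map (fun p => p.toList ++ pvV)
      = ((pySplitSpace s).map String.toList).map (· ++ pvV) := by
    simp [List.map_map, Function.comp]
  rw [this, pySplitSpace_toList, pvExpand_spec s.toList pvV, ← pvReplace_eq]
  rw [pvExpand, String.toList_append, PySem.Str.toList_replace]
  rfl

theorem pvIntercalate_nil : ∀ (xs : List (List Char)), List.intercalate [] xs = xs.flatten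
  | [] => by rfl
  | [a] => by simp [List.intercalate]
  | a :: b :: u => by
      have h := pvIntercalate_nil (b :: u)
      rw [show List.intercalate ([] : List Char) (a :: b :: u)
            = a ++ [] ++ List.intercalate [] (b :: u) from by
        simp [List.intercalate, List.intersperse], h]
      simp

theorem pvJoinNil_toList (parts : List String) :
    (PySem.Str.join "" parts).toList = (parts.map String.toList).flatten := by
  rw [PySem.Str.toList_join, PySem.Chars.join]
  rw [show ("" : String).toList = [] from rfl]
  exact pvIntercalate_nil _

-- per item: comma-normal form of A's tokens = B's part
theorem pvItem (item : List String) :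
    pvNorm ((pvTokA item).map String.toList) = (pvPartB item).toList := by
  rw [pvTokA, pvPartB]
  by_cases h : (item.length == 1) = true
  · rw [if_pos h, if_pos h, pvNorm_ph]
  · rw [if_neg h, if_neg h]
    simp only [List.map_append, pvNorm_append]
    rw [pvNorm_ph]
    have hmid : pvNorm (((PySem.List.slice item none (some (-1))).flatMap
          (fun sub => pvPh sub ++ ["||"])).map String.toList)
        = ((PySem.List.slice item none (some (-1))).map
            (fun sub => (pvExpand sub ++ "||,").toList)).flatten := by
      rw [List.map_flatMap, pvNorm_flatMap]
      congr 1
      refine List.map_congr_left (fun sub _ => ?_)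
      rw [List.map_append, pvNorm_append, pvNorm_ph, String.toList_append]
      simp [pvNorm]
    rw [hmid, String.toList_append, String.toList_append, String.toList_append,
        pvJoinNil_toList, List.map_map]
    have e1 : pvNorm (List.map String.toList ["("]) = "(,".toList := by decide
    have e2 : pvNorm (List.map String.toList [")"]) = "),".toList := by decide
    rw [e1, e2]
    have e3 : List.map (String.toList ∘ fun sub => pvExpand sub ++ "||,")
          (PySem.List.slice item none (some (-1)))
        = List.map (fun sub => (pvExpand sub ++ "||,").toList)
          (PySem.List.slice item none (some (-1))) := by
      refine List.map_congr_left (fun sub _ => ?_)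
      rfl
    rw [e3]

theorem pvPartsB (mt : List (List String)) :
    (mt.foldl (fun parts item =>
      if item.length == 1 then parts ++ [pvExpand (PySem.List.pyGetD item 0 "")]
      else parts ++ ["(," ++ PySem.Str.join ""
            ((PySem.List.slice item none (some (-1))).map (fun sub => pvExpand sub ++ "||,"))
          ++ pvExpand (PySem.List.pyGetD item (-1) "") ++ "),"]) [])
      = mt.map pvPartB := by
  have hf : (fun (parts : List String) item =>
      if item.length == 1 then parts ++ [pvExpand (PySem.List.pyGetD item 0 "")]
      else parts ++ ["(," ++ PySem.Str.join ""
            ((PySem.List.slice item none (some (-1))).map (fun sub => pvExpand sub ++ "||,"))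
          ++ pvExpand (PySem.List.pyGetD item (-1) "") ++ "),"])
      = fun parts item => parts ++ [pvPartB item] := by
    funext parts item
    by_cases h : (item.length == 1) = true <;> simp [pvPartB, h]
  rw [hf, PySem.List.foldl_append_singleton_eq_map]
  simp

theorem pvFlatMapTokA_nospace (mt : List (List String)) :
    ∀ p ∈ (mt.flatMap pvTokA).map String.toList, ' ' ∉ p := by
  intro p hp
  rcases List.mem_map.mp hp with ⟨tok, htok, rfl⟩
  rcases List.mem_flatMap.mp htok with ⟨item, _, hmem⟩
  exact pvTokA_nospace item tok hmem

theorem pvA_toList (mt : List (List String)) (hne : mt.flatMap pvTokA ≠ []) :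
    (generate_expectation mt).toList = pvNorm ((mt.flatMap pvTokA).map String.toList) := by
  unfold generate_expectation
  simp only [pvExpA]
  rw [String.toList_append, PySem.Str.toList_join]
  rw [show (",").toList = [','] from rfl, pySplitSpace_toList, PySem.Str.toList_join]
  rw [show (" ").toList = [' '] from rfl]
  simp only [PySem.Chars.join]
  rw [pvSplit_join ((mt.flatMap pvTokA).map String.toList) (by simpa using hne)
      (pvFlatMapTokA_nospace mt)]
  exact pvCommaJoin _ (by simpa using hne)

theorem pvB_toList (mt : List (List String)) :
    (generate_expectation_alt mt).toList = ((mt.map pvPartB).map String.toList).flatten := by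
  unfold generate_expectation_alt
  simp only [pvPartsB]
  exact pvJoinNil_toList _

-- ===== VERDICT (by name: the statement is the Claim_ definition above) =====
theorem generate_expectation_spec : Claim_unchanged_generate_expectation := by
  intro mt _ _
  unfold Spec_generate_expectation
  intro hd
  apply String.toList_inj.mp
  cases mt with
  | nil => exact absurd rfl hd
  | cons item rest =>
      rw [pvA_toList _ (by
        have := pvTokA_ne_nil item
        simp only [List.flatMap_cons]
        intro hcontra
        exact this (List.append_eq_nil_iff.mp hcontra).1)]
      rw [pvB_toList]
      rw [List.map_flatMap, pvNorm_flatMap, List.map_map]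
      congr 1
      refine List.map_congr_left (fun i hi => ?_)
      simpa using pvItem i

theorem generate_expectation_changed : Claim_changed_generate_expectation := by
  unfold Claim_changed_generate_expectation; decide

theorem generate_expectation_tight : Claim_exact_generate_expectation := by
  intro mt _ _ hd
  subst hd
  decide
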